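-- pv_equiv track=rewrite | github.com/GuruPrakashKumar/Java-Notes | Sorting/ma.py | ccc
-- ===== SOURCE A (Python) =====
-- def ccc(row):
--
--     ccc = 0
--     last = -1
--
--     for i in range(len(row) - 1):
--
--          if row[i] != row[i + 1]:
--              ccc += (i-last) *(len(row) -i - 1)
--              last = i
--
--     return ccc
-- ===== SOURCE B (Python) =====
-- def ccc(row):
--     # Complementary counting: ccc counts pairs (l, r), l < r, whose subarray
--     # row[l..r] is not constant.  Start from the total number of pairs
--     # n*(n-1)//2 and subtract L*(L-1)//2 for each maximal run of equal
--     # elements of length L (the constant pairs).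
--     n = len(row)
--     total = n * (n - 1) // 2
--     runlen = 1
--     for i in range(1, n):
--         if row[i] == row[i - 1]:
--             runlen += 1
--         else:
--             total -= runlen * (runlen - 1) // 2
--             runlen = 1
--     return total - runlen * (runlen - 1) // 2
-- ===== Notes on version B (the rewrite author's own statement) =====
-- stated objective: alternative
-- what changed: A accumulates a product weight (i-last)*(n-i-1) at each boundary between unequal neighbours; B counts by complement: all n*(n-1)//2 pairs minus L*(L-1)//2 constant pairs for each maximal run of equal elements, found in one run-length scan.
import Mathlib
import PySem

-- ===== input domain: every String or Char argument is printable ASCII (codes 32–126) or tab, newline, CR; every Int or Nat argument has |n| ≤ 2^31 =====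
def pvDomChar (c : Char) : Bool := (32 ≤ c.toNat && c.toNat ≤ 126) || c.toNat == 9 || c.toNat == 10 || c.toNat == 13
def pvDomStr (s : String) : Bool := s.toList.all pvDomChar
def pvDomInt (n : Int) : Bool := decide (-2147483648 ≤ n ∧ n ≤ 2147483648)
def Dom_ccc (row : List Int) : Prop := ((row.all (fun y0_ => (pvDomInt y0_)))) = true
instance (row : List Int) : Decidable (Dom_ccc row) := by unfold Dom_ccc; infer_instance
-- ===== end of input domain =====

-- B replaces A's boundary-weighted product accumulation by complementary counting:
-- all n*(n-1)//2 pairs minus the constant pairs of each maximal run — an alternative algorithm of the same cost.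


-- ===== PORT A =====
-- loop body of A: state (ccc, last), index i; 'if row[i] != row[i+1]: ccc += (i-last)*(len(row)-i-1); last = i'
def cccBodyA (row : List Int) (st : Int × Int) (i : Int) : Int × Int :=
  if PySem.List.pyGet? row i ≠ PySem.List.pyGet? row (i + 1) then
    (st.1 + (i - st.2) * ((row.length : Int) - i - 1), i)
  else st

def ccc (row : List Int) : Int :=
  ((PySem.List.pyRange 0 ((row.length : Int) - 1) 1).foldl (cccBodyA row) (0, -1)).1

-- ===== PORT B =====
-- loop body of B: state (total, runlen), index i;
-- 'if row[i] == row[i-1]: runlen += 1 else: total -= runlen*(runlen-1)//2; runlen = 1'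
def cccRun (row : List Int) (st : Int × Int) (i : Int) : Int × Int :=
  if PySem.List.pyGet? row i = PySem.List.pyGet? row (i - 1) then
    (st.1, st.2 + 1)
  else
    (st.1 - PySem.Int.floordiv (st.2 * (st.2 - 1)) 2, 1)

def ccc_alt (row : List Int) : Int :=
  let n : Int := (row.length : Int)
  let st := (PySem.List.pyRange 1 n 1).foldl (cccRun row)
      (PySem.Int.floordiv (n * (n - 1)) 2, 1)
  st.1 - PySem.Int.floordiv (st.2 * (st.2 - 1)) 2

-- ===== PRECONDITION & SPEC =====
def Spec_ccc (row : List Int) (out : Int) : Prop := out = ccc_alt row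
instance (row : List Int) (out : Int) : Decidable (Spec_ccc row out) := by unfold Spec_ccc; infer_instance

-- ===== CLAIM (what is proved, stated in full; the proofs are below) =====
def Claim_equal_ccc : Prop := ∀ (row : List Int), Dom_ccc row → Spec_ccc row (ccc row)

-- ===== LEMMAS AND PROOFS =====

-- m*(m-1) is even, so B's floor division by 2 is exact (stated in doubled form).
theorem two_mul_floordiv_pred (m : Int) :
    2 * PySem.Int.floordiv (m * (m - 1)) 2 = m * (m - 1) := by
  obtain ⟨k, hk⟩ : Even (m * (m - 1)) := Int.even_mul_pred_self m
  rw [hk, show k + k = k * 2 from by ring,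
    PySem.Int.floordiv_eq_ediv_of_pos (by norm_num), Int.mul_ediv_cancel _ (by norm_num)]
  ring

-- Joint loop invariant after k steps of each loop: B's run length is k minus A's last
-- boundary, and B's doubled total exceeds A's doubled count by the doubled pair count
-- of the suffix starting at the current run (the pairs A has not yet charged).
theorem ccc_inv (row : List Int) (k : ℕ) :
    (((PySem.List.pyRange 1 ((k : Int) + 1) 1).foldl (cccRun row)
        (PySem.Int.floordiv ((row.length : Int) * ((row.length : Int) - 1)) 2, 1)).2
      = (k : Int) - ((PySem.List.pyRange 0 (k : Int) 1).foldl (cccBodyA row) (0, -1)).2)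
    ∧ (2 * ((PySem.List.pyRange 1 ((k : Int) + 1) 1).foldl (cccRun row)
        (PySem.Int.floordiv ((row.length : Int) * ((row.length : Int) - 1)) 2, 1)).1
      = 2 * ((PySem.List.pyRange 0 (k : Int) 1).foldl (cccBodyA row) (0, -1)).1
        + ((row.length : Int) - 1
            - ((PySem.List.pyRange 0 (k : Int) 1).foldl (cccBodyA row) (0, -1)).2)
          * ((row.length : Int) - 2
            - ((PySem.List.pyRange 0 (k : Int) 1).foldl (cccBodyA row) (0, -1)).2)) := by
  induction k with
  | zero =>
      rw [Nat.cast_zero, zero_add, PySem.List.pyRange_one_eq_nil (le_refl (0 : Int)),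
        PySem.List.pyRange_one_eq_nil (le_refl (1 : Int))]
      refine ⟨by norm_num, ?_⟩
      simp only [List.foldl_nil]
      rw [two_mul_floordiv_pred]
      ring
  | succ k ih =>
      obtain ⟨ih1, ih2⟩ := ih
      have hA : PySem.List.pyRange 0 ((k : Int) + 1) 1
          = PySem.List.pyRange 0 (k : Int) 1 ++ [(k : Int)] :=
        PySem.List.pyRange_one_succ_right (by positivity)
      have hB : PySem.List.pyRange 1 (((k : Int) + 1) + 1) 1
          = PySem.List.pyRange 1 ((k : Int) + 1) 1 ++ [(k : Int) + 1] :=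
        PySem.List.pyRange_one_succ_right (by omega)
      push_cast
      rw [hA, hB, List.foldl_append, List.foldl_append, List.foldl_cons, List.foldl_nil,
        List.foldl_cons, List.foldl_nil]
      simp only [cccBodyA, cccRun]
      rw [show ((k : Int) + 1 - 1) = (k : Int) from by ring]
      by_cases h : PySem.List.pyGet? row (k : Int) = PySem.List.pyGet? row ((k : Int) + 1)
      · rw [if_neg (not_not_intro h), if_pos h.symm]
        refine ⟨by rw [ih1]; ring, by rw [ih2]⟩
      · rw [if_pos h, if_neg (fun hh => h hh.symm)]
        constructor
        · simp
        · simp only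
          rw [mul_sub, two_mul_floordiv_pred, ih2, ih1]
          ring

-- ===== VERDICT (by name: the statement is the Claim_ definition above) =====
theorem ccc_spec : Claim_equal_ccc := by
  intro row _
  unfold Spec_ccc ccc ccc_alt
  cases row with
  | nil => decide
  | cons a t =>
      have h := ccc_inv (a :: t) t.length
      obtain ⟨h1, h2⟩ := h
      have hlen : (((a :: t).length : Int)) = (t.length : Int) + 1 := by
        rw [List.length_cons]; push_cast; ring
      simp only at h1 h2 ⊢
      rw [hlen] at h1 h2 ⊢
      rw [show ((t.length : Int) + 1 - 1) = (t.length : Int) from by ring] at h1 h2 ⊢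
      set stB := (PySem.List.pyRange 1 ((t.length : Int) + 1) 1).foldl (cccRun (a :: t))
        (PySem.Int.floordiv (((t.length : Int) + 1) * (t.length : Int)) 2, 1) with hstB
      set stA := (PySem.List.pyRange 0 (t.length : Int) 1).foldl (cccBodyA (a :: t)) (0, -1)
        with hstA
      have hd := two_mul_floordiv_pred stB.2
      rw [h1] at hd ⊢
      rw [show ((t.length : Int) + 1 - 2 - stA.2) = (t.length : Int) - stA.2 - 1 from by ring]
        at h2
      linarith
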